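-- pv_equiv track=rewrite | github.com/streed/simplePB | simplePB/protocol.py | __convert_body_to_string
-- ===== SOURCE A (Python) =====
-- def __convert_body_to_string( value ):
-- 	"""
-- 		Because of how the data is formated wherein each byte is represented by
-- 		2 characters this will take the current _value_ which is a interger and
-- 		convert it to a string such that every 8bits will be represented by 2
-- 		hexidecimal characters.
-- 	"""
-- 	ret = []
-- 	while value > 0:
-- 		v = value & 0xFF
-- 		ret.append( "%02X" % v )
-- 		value = value >> 8
--
-- 	ret.reverse()
-- 	return "".join( ret )
-- ===== SOURCE B (Python) =====
-- def __convert_body_to_string( value ):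
-- 	"""Big-endian uppercase hex of a positive integer, two digits per byte."""
-- 	if value <= 0:
-- 		return ""
-- 	return value.to_bytes((value.bit_length() + 7) // 8, "big").hex().upper()
-- ===== Notes on version B (the rewrite author's own statement) =====
-- stated objective: idiomatic
-- what changed: Replaces the explicit low-byte extraction loop with reverse-and-join by a single closed-form library conversion via int.to_bytes/bit_length/hex/upper, returning the empty string for non-positive input as A does.
import Mathlib
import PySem

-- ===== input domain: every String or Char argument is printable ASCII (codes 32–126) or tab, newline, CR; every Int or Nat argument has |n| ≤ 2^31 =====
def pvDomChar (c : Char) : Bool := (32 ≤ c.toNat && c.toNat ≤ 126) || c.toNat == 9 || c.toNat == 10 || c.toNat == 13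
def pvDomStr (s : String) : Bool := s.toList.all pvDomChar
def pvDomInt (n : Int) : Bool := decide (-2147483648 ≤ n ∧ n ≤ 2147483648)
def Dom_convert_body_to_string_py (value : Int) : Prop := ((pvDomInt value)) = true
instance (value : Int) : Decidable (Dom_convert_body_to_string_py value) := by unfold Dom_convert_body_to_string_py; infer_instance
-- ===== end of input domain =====

-- B replaces A's low-byte extraction loop + reverse-and-join by the closed-form
-- library conversion value.to_bytes((bit_length+7)//8,'big').hex().upper() (idiomatic; same cost).


-- ===== PORT A =====
def pvHexDigits : List Char := ['0','1','2','3','4','5','6','7','8','9','A','B','C','D','E','F']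

-- "%02X" % v  (exact for 0 ≤ v ≤ 255, the only values both Pythons format)
def pvFmt02X (v : Int) : String :=
  String.ofList [pvHexDigits.getD (v.toNat / 16) '0', pvHexDigits.getD (v.toNat % 16) '0']

-- termination helper for the while loop: v >> 8 shrinks toNat
theorem pvShiftRight_toNat (v : Int) (k : Nat) (h : 0 ≤ v) :
    (v >>> k).toNat = v.toNat >>> k := by
  obtain ⟨m, rfl⟩ := Int.eq_ofNat_of_zero_le h
  rw [← Int.natCast_shiftRight]
  exact Int.toNat_natCast _

-- the while loop of A: ret grows at the back, value shifts right by 8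
def pvALoop (value : Int) (ret : List String) : List String :=
  if h : 0 < value then
    pvALoop (value >>> (8:Nat)) (ret ++ [pvFmt02X (PySem.Int.band value 0xFF)])
  else ret
termination_by value.toNat
decreasing_by
  rw [pvShiftRight_toNat value 8 (le_of_lt h), Nat.shiftRight_eq_div_pow]
  exact Nat.div_lt_self (by omega) (by norm_num)

def convert_body_to_string_py (value : Int) : String :=
  PySem.Str.join "" (pvALoop value []).reverse

-- ===== PORT B =====
def pvHexLower : List Char := ['0','1','2','3','4','5','6','7','8','9','a','b','c','d','e','f']

-- bytes.hex() renders one byte as two lowercase hex digits (exact for b < 256)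
def pvByteHex (b : Nat) : List Char := [pvHexLower.getD (b/16) '0', pvHexLower.getD (b%16) '0']

def convert_body_to_string_py_alt (value : Int) : String :=
  if value ≤ 0 then "" else
    let n : Nat := (PySem.Int.bitLength value + 7) / 8
    -- value.to_bytes(n, "big") = the n big-endian bytes of value (exact: 0 < value < 256^n
    -- by choice of n); .hex() = two lowercase digits per byte; then .upper()
    PySem.Str.upper (String.ofList
      (((List.range n).map (fun i => (value >>> (8*(n-1-i))).toNat % 256)).flatMap pvByteHex))

-- ===== PRECONDITION & SPEC =====
def Spec_convert_body_to_string_py (value : Int) (out : String) : Prop := out = convert_body_to_string_py_alt value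
instance (value : Int) (out : String) : Decidable (Spec_convert_body_to_string_py value out) := by unfold Spec_convert_body_to_string_py; infer_instance

-- ===== CLAIM (what is proved, stated in full; the proofs are below) =====
def Claim_equal_convert_body_to_string_py : Prop := ∀ (value : Int), Dom_convert_body_to_string_py value → Spec_convert_body_to_string_py value (convert_body_to_string_py value)

-- ===== LEMMAS AND PROOFS =====

theorem pvBand255 (m : Nat) : PySem.Int.band (m : Int) 0xFF = ((m % 256 : Nat) : Int) := by
  have h := Nat.and_two_pow_sub_one_eq_mod m 8
  norm_num at h
  simp [PySem.Int.band, h]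

theorem pvShiftRight_cast (m k : Nat) : ((m:Int) >>> k) = ((m >>> k : Nat) : Int) :=
  (Int.natCast_shiftRight m k).symm

theorem pvDigitUpper : ∀ d : Nat, d < 16 →
    PySem.Chars.upperChar (pvHexLower.getD d '0') = pvHexDigits.getD d '0' := by decide

theorem pvByteBridge (w : Int) (hw : 0 ≤ w) :
    PySem.Chars.upper (pvByteHex (w.toNat % 256)) =
      (pvFmt02X (PySem.Int.band w 0xFF)).toList := by
  obtain ⟨m, rfl⟩ := Int.eq_ofNat_of_zero_le hw
  rw [pvBand255]
  simp only [pvByteHex, pvFmt02X, PySem.Chars.upper, List.map_cons, List.map_nil,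
    String.toList_ofList, Int.toNat_natCast]
  rw [pvDigitUpper _ (by omega), pvDigitUpper _ (by omega)]

theorem pvJoinNilFlatten (xss : List (List Char)) :
    PySem.Chars.join [] xss = xss.flatten := by
  induction xss with
  | nil => rfl
  | cons x t ih =>
    cases t with
    | nil => simp [PySem.Chars.join_singleton]
    | cons y t2 =>
      rw [PySem.Chars.join_cons_cons]
      simp only [List.flatten_cons]
      rw [ih]
      simp

theorem pvShift_nonneg (v : Int) (hv : 0 ≤ v) (k : Nat) : 0 ≤ v >>> k := by
  obtain ⟨m, rfl⟩ := Int.eq_ofNat_of_zero_le hv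
  rw [pvShiftRight_cast]
  exact Int.natCast_nonneg _

theorem pvALoop_append (value : Int) (ret : List String) :
    pvALoop value ret = ret ++ pvALoop value [] := by
  by_cases h : 0 < value
  · rw [pvALoop, dif_pos h,
        pvALoop_append (value >>> (8:Nat)) (ret ++ [pvFmt02X (PySem.Int.band value 0xFF)])]
    conv_rhs => rw [pvALoop, dif_pos h,
        pvALoop_append (value >>> (8:Nat)) ([] ++ [pvFmt02X (PySem.Int.band value 0xFF)])]
    simp
  · rw [pvALoop, dif_neg h]
    conv_rhs => rw [pvALoop, dif_neg h]
    simp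
termination_by value.toNat
decreasing_by
  all_goals rw [pvShiftRight_toNat value 8 (by omega), Nat.shiftRight_eq_div_pow]
  all_goals exact Nat.div_lt_self (by omega) (by norm_num)

theorem pvALoop_pos (v : Int) (h : 0 < v) :
    pvALoop v [] = pvFmt02X (PySem.Int.band v 0xFF) :: pvALoop (v >>> (8:Nat)) [] := by
  rw [pvALoop, dif_pos h, pvALoop_append]
  simp

theorem pvMain (n : Nat) (v : Int) (hv : 0 < v)
    (hlo : 256^(n-1) ≤ v.toNat) (hhi : v.toNat < 256^n) :
    (pvALoop v []).reverse =
      (List.range n).map (fun i => pvFmt02X (PySem.Int.band (v >>> (8*(n-1-i))) 0xFF)) := by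
  induction n generalizing v with
  | zero => norm_num at hhi; omega
  | succ k ih =>
    obtain ⟨m, rfl⟩ := Int.eq_ofNat_of_zero_le (le_of_lt hv)
    have hm : 0 < m := by exact_mod_cast hv
    have hw : ((m:Int) >>> (8:Nat)) = ((m >>> 8 : Nat) : Int) := pvShiftRight_cast m 8
    have hdiv : m >>> 8 = m / 256 := by rw [Nat.shiftRight_eq_div_pow]
    have hhi' : m < 256^(k+1) := by simpa using hhi
    rw [pvALoop_pos _ hv, List.reverse_cons, List.range_succ, List.map_append]
    have hlast : ((m:Int) >>> (8*(k+1-1-k))) = (m:Int) := by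
      have : 8*(k+1-1-k) = 0 := by omega
      rw [this, pvShiftRight_cast]
      simp
    simp only [List.map_cons, List.map_nil, hlast]
    congr 1
    rw [hw]
    by_cases hk : k = 0
    · subst hk
      have hz : m >>> 8 = 0 := by
        rw [hdiv]; apply Nat.div_eq_of_lt; simpa using hhi'
      rw [hz]
      rw [pvALoop, dif_neg (by norm_num)]
      simp
    · have hlo' : 256^(k-1) ≤ (((m >>> 8 : Nat) : Int)).toNat := by
        rw [Int.toNat_natCast, hdiv]
        rw [Nat.le_div_iff_mul_le (by norm_num)]
        calc 256^(k-1) * 256 = 256^k := by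
              rw [← pow_succ]; congr 1; omega
          _ ≤ m := by
              have h := hlo
              simp at h
              simpa using h
      have hhi'' : (((m >>> 8 : Nat) : Int)).toNat < 256^k := by
        rw [Int.toNat_natCast, hdiv]
        rw [Nat.div_lt_iff_lt_mul (by norm_num)]
        calc m < 256^(k+1) := by simpa using hhi'
          _ = 256^k * 256 := by rw [← pow_succ]
      have hw0 : (0:Int) < ((m >>> 8 : Nat) : Int) := by
        have : 0 < m >>> 8 := by
          have := hlo'
          simp at this
          calc 0 < 256^(k-1) := pow_pos (by norm_num) _
            _ ≤ m >>> 8 := this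
        exact_mod_cast this
      rw [ih _ hw0 hlo' hhi'']
      apply List.map_congr_left
      intro i hi
      have hik : i < k := List.mem_range.mp hi
      congr 2
      rw [pvShiftRight_cast, pvShiftRight_cast, ← Nat.shiftRight_add]
      congr 2
      omega

theorem pvPowBounds (v : Int) (hv : 0 < v) :
    256^((PySem.Int.bitLength v + 7)/8 - 1) ≤ v.toNat ∧
      v.toNat < 256^((PySem.Int.bitLength v + 7)/8) := by
  have h1 := PySem.Int.lt_two_pow_bitLength v
  have h2 := PySem.Int.two_pow_bitLength_le v (by omega)
  set bl := PySem.Int.bitLength v with hbl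
  have hbl1 : 1 ≤ bl := by
    by_contra hc
    have : bl = 0 := by omega
    rw [this] at h1
    simp at h1
    omega
  have hna : v.natAbs = v.toNat := by omega
  rw [hna] at h1 h2
  constructor
  · calc 256^((bl+7)/8 - 1) = 2^(8*((bl+7)/8 - 1)) := by
          rw [pow_mul]; norm_num
      _ ≤ 2^(bl-1) := Nat.pow_le_pow_right (by norm_num) (by omega)
      _ ≤ v.toNat := h2
  · calc v.toNat < 2^bl := h1
      _ ≤ 2^(8*((bl+7)/8)) := Nat.pow_le_pow_right (by norm_num) (by omega)
      _ = 256^((bl+7)/8) := by rw [pow_mul]; norm_num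

-- ===== VERDICT (by name: the statement is the Claim_ definition above) =====
theorem pvStrings_eq_of_toList {s t : String} (h : s.toList = t.toList) : s = t := by
  rw [← String.ofList_toList (s := s), h, String.ofList_toList]

theorem convert_body_to_string_py_spec : Claim_equal_convert_body_to_string_py := by
  intro value _
  unfold Spec_convert_body_to_string_py convert_body_to_string_py convert_body_to_string_py_alt
  by_cases h : value ≤ 0
  · rw [if_pos h, pvALoop, dif_neg (by omega)]
    rfl
  · rw [if_neg h]
    obtain ⟨hlo, hhi⟩ := pvPowBounds value (by omega)
    rw [pvMain _ value (by omega) hlo hhi]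
    apply pvStrings_eq_of_toList
    simp only [PySem.Str.join, PySem.Str.toList_upper, String.toList_ofList]
    rw [show (String.toList "") = [] from rfl, pvJoinNilFlatten]
    simp only [PySem.Chars.upper, List.flatMap_def, List.map_flatten, List.map_map]
    congr 1
    apply List.map_congr_left
    intro i hi
    exact (pvByteBridge (value >>> (8*((PySem.Int.bitLength value + 7)/8-1-i)))
      (pvShift_nonneg value (by omega) _)).symm
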